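-- pv_equiv track=rewrite | github.com/pypi-data/pypi-mirror-321 | packages/noideacore/noideacore-1.4.1-py3-none-any.whl/noideacore/data/data.py | _process
-- ===== SOURCE A (Python) =====
-- def _process(data:list, dates_list):
--     _data = [x for x in data]
--     finished_data = []
--     for num in range(len(dates_list)):
--         if num != (len(dates_list) - 1):
--             date = dates_list[num + 1]
--             _finished_data = []
--             for x in _data:
--                 if x[-1] < date:
--                     _finished_data.append(x[0:-1])
--             if len(_finished_data) != 0:
--                 for x in range(len(_finished_data)):
--                     del _data[0]
--             finished_data.append(_finished_data)
--     return finished_data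
-- ===== SOURCE B (Python) =====
-- def _process(data: list, dates_list):
--     # Moving-pointer version: A only ever deletes from the FRONT of its working
--     # copy, so the remaining records are always the suffix data[p:].  Keep the
--     # index p instead of copying and repeatedly deleting, and stop scanning as
--     # soon as every record has been consumed (all later buckets are empty).
--     finished_data = []
--     p = 0
--     n = len(data)
--     tail = dates_list[1:]
--     m = len(tail)
--     j = 0
--     while j < m and p < n:
--         bucket = [x[:-1] for x in data[p:] if x[-1] < tail[j]]
--         p += len(bucket)
--         finished_data.append(bucket)
--         j += 1
--     finished_data.extend([[] for _ in range(m - j)])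
--     return finished_data
-- ===== Notes on version B (the rewrite author's own statement) =====
-- stated objective: alternative
-- what changed: B keeps a moving start index into the original list instead of copying the data and repeatedly executing del _data[0], and stops scanning once every record has been consumed, padding the remaining intervals with empty buckets; it trades A's shrinking working copy for index arithmetic (much faster on data-heavy inputs, even on date-heavy sorted ones).
import Mathlib
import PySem

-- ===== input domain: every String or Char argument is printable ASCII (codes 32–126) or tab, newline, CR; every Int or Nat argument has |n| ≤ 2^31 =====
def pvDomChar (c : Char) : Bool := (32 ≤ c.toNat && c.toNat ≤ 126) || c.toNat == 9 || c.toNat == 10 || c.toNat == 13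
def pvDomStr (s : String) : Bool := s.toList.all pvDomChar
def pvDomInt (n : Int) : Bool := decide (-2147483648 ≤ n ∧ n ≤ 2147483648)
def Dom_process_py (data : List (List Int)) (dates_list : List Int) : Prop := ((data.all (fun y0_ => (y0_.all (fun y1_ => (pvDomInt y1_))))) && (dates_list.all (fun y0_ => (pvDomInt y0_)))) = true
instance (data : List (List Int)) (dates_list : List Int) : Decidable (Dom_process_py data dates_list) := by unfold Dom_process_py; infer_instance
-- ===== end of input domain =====

-- One honest line: B replaces A's copy-and-delete-from-front working list by a moving
-- start index into the original data and stops scanning once all records are consumed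
-- (objective: alternative — no front deletions or post-exhaustion rescans, same worst case).

-- ===== PORT A =====
-- Literal transliteration of _process: working copy, range loop over indices,
-- append-if inner loop, del _data[0] repeated len(bucket) times.
-- x[-1] is ported with pyGetD (default 0): exact on Pre_ (no empty record reaches it).
def process_py (data : List (List Int)) (dates_list : List Int) : List (List (List Int)) :=
  let _data0 := data.map (fun x => x)            -- _data = [x for x in data]
  let n : Int := (dates_list.length : Int)
  let r := (PySem.List.pyRange 0 n 1).foldl
    (fun (st : List (List Int) × List (List (List Int))) num =>
      if num ≠ n - 1 then
        let date := PySem.List.pyGetD dates_list (num + 1) 0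
        let fd := st.1.foldl
          (fun acc x =>
            if PySem.List.pyGetD x (-1) 0 < date then
              acc ++ [PySem.List.slice x (some 0) (some (-1))]
            else acc) []
        let _data' := if fd.length ≠ 0 then
            (List.range fd.length).foldl (fun d _ => d.drop 1) st.1   -- del _data[0], fd.length times
          else st.1
        (_data', st.2 ++ [fd])
      else st)
    (_data0, [])
  r.2

-- ===== PORT B =====
-- Literal transliteration of Source B: while-loop over the tail of dates_list carrying
-- (j, p) becomes structural recursion on the remaining tail with the pointer p;
-- data[p:] is data.drop p (p is a Nat counter, always ≥ 0), the comprehension is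
-- filterMap, and the final extend of (m - j) empty buckets is List.replicate.
def processAltLoop (data : List (List Int)) (n : Nat) : List Int → Nat → List (List (List Int))
  | [], _ => []
  | date :: ds, p =>
    if p < n then
      let bucket := (data.drop p).filterMap
        (fun x =>
          if PySem.List.pyGetD x (-1) 0 < date then
            some (PySem.List.slice x none (some (-1)))
          else none)
      bucket :: processAltLoop data n ds (p + bucket.length)
    else List.replicate (ds.length + 1) []

def process_py_alt (data : List (List Int)) (dates_list : List Int) : List (List (List Int)) :=
  processAltLoop data data.length (PySem.List.slice dates_list (some 1) none) 0

-- ===== PRECONDITION & SPEC =====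
-- Pre_ excludes exactly the inputs where the Python A raises IndexError: an empty
-- record x makes x[-1] raise, and every record is inspected as soon as dates_list
-- has at least two entries (with fewer, the inner loop never runs).
def Pre_process_py (data : List (List Int)) (dates_list : List Int) : Prop :=
  2 ≤ dates_list.length → ¬ ([] ∈ data)
instance (data : List (List Int)) (dates_list : List Int) : Decidable (Pre_process_py data dates_list) := by
  unfold Pre_process_py; infer_instance

def pvWitness_process_py : List (List Int) × List Int := ([[1, 5], [2, 10]], [0, 7, 20])

def Spec_process_py (data : List (List Int)) (dates_list : List Int) (out : List (List (List Int))) : Prop := out = process_py_alt data dates_list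
instance (data : List (List Int)) (dates_list : List Int) (out : List (List (List Int))) : Decidable (Spec_process_py data dates_list out) := by unfold Spec_process_py; infer_instance

-- ===== CLAIM (what is proved, stated in full; the proofs are below) =====
def Claim_equal_process_py : Prop := ∀ (data : List (List Int)) (dates_list : List Int), Dom_process_py data dates_list → Pre_process_py data dates_list → Spec_process_py data dates_list (process_py data dates_list)

-- ===== LEMMAS AND PROOFS =====

-- The bucket made by A's append-if fold is B's filterMap.
theorem pv_bucket_eq (l : List (List Int)) (date : Int) (acc : List (List Int)) :
    l.foldl (fun acc x =>
        if PySem.List.pyGetD x (-1) 0 < date then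
          acc ++ [PySem.List.slice x none (some (-1))]
        else acc) acc
    = acc ++ l.filterMap (fun x =>
        if PySem.List.pyGetD x (-1) 0 < date then
          some (PySem.List.slice x none (some (-1)))
        else none) := by
  induction l generalizing acc with
  | nil => simp
  | cons x xs ih =>
    simp only [List.foldl_cons, List.filterMap_cons]
    by_cases h : PySem.List.pyGetD x (-1) 0 < date
    · simp [h, ih]
    · simp [h, ih]

-- A's repeated `del _data[0]` is List.drop.
theorem pv_dropN (k : Nat) (l : List (List Int)) :
    (List.range k).foldl (fun d _ => d.drop 1) l = l.drop k := by
  induction k generalizing l with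
  | zero => simp
  | succ m ih =>
    rw [List.range_succ, List.foldl_append, ih]
    simp

-- Abbreviation used only in the proofs below.
def pvBucket (l : List (List Int)) (date : Int) : List (List Int) :=
  l.filterMap (fun x =>
    if PySem.List.pyGetD x (-1) 0 < date then
      some (PySem.List.slice x none (some (-1)))
    else none)

-- Main loop invariant: A's working list is always the suffix data.drop p.
theorem pv_loop (data : List (List Int)) (ds : List Int) :
    ∀ (p : Nat) (acc : List (List (List Int))),
    (ds.foldl
      (fun (st : List (List Int) × List (List (List Int))) date =>
        let fd := pvBucket st.1 date
        ((if fd.length ≠ 0 then st.1.drop fd.length else st.1), st.2 ++ [fd]))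
      (data.drop p, acc)).2
    = (ds.foldl
        (fun (st : Nat × List (List (List Int))) date =>
          let bucket := pvBucket (data.drop st.1) date
          (st.1 + bucket.length, st.2 ++ [bucket]))
        (p, acc)).2 := by
  induction ds with
  | nil => intro p acc; simp
  | cons d ds ih =>
    intro p acc
    simp only [List.foldl_cons]
    have hdrop : (if (pvBucket (data.drop p) d).length ≠ 0 then
        (data.drop p).drop (pvBucket (data.drop p) d).length else data.drop p)
        = data.drop (p + (pvBucket (data.drop p) d).length) := by
      by_cases h : (pvBucket (data.drop p) d).length = 0
      · simp [h]
      · simp [h, List.drop_drop]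
    rw [hdrop]
    exact ih (p + (pvBucket (data.drop p) d).length) (acc ++ [pvBucket (data.drop p) d])

-- [l.getD 0 d, l.getD 1 d, …] rebuilt over range l.length is l itself.
theorem pv_map_getD_range {α : Type} (l : List α) (d : α) :
    (List.range l.length).map (fun i => l.getD i d) = l := by
  apply List.ext_getElem
  · simp
  · intro i h1 h2
    simp [List.getD_eq_getElem?_getD, h2]

-- Fold over range l.length reading l.getD is a fold over l.
theorem pv_foldl_range_getD {α β : Type} (l : List α) (d : α)
    (g : β → α → β) (s : β) :
    (List.range l.length).foldl (fun st i => g st (l.getD i d)) s = l.foldl g s := by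
  conv_rhs => rw [← pv_map_getD_range l d]
  rw [List.foldl_map]

-- Fold the filterMap term into the pvBucket abbreviation (definitional).
theorem pvBucket_fold (l : List (List Int)) (date : Int) :
    l.filterMap (fun x =>
      if PySem.List.pyGetD x (-1) 0 < date then
        some (PySem.List.slice x none (some (-1)))
      else none) = pvBucket l date := rfl

-- The cons-case goal of the verdict, assembled from pv_range_loop and pv_loop.
-- Drop A's skipped last iteration and convert the index loop over range(len) into a
-- direct fold over the tail of dates_list.
theorem pv_range_loop (d0 : Int) (rest : List Int)
    (s : List (List Int) × List (List (List Int))) :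
    (List.range rest.length).foldl
      (fun (x : List (List Int) × List (List (List Int))) (y : Nat) =>
        if (y : Int) ≠ ((rest.length + 1 : Nat) : Int) - 1 then
          (if (pvBucket x.1 (PySem.List.pyGetD (d0 :: rest) ((y : Int) + 1) 0)).length ≠ 0 then
             x.1.drop (pvBucket x.1 (PySem.List.pyGetD (d0 :: rest) ((y : Int) + 1) 0)).length
           else x.1,
           x.2 ++ [pvBucket x.1 (PySem.List.pyGetD (d0 :: rest) ((y : Int) + 1) 0)])
        else x) s
    = rest.foldl
        (fun st date =>
          (if (pvBucket st.1 date).length ≠ 0 then st.1.drop (pvBucket st.1 date).length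
           else st.1,
           st.2 ++ [pvBucket st.1 date])) s := by
  rw [← pv_foldl_range_getD rest 0
    (fun st date =>
      (if (pvBucket st.1 date).length ≠ 0 then st.1.drop (pvBucket st.1 date).length
       else st.1,
       st.2 ++ [pvBucket st.1 date])) s]
  apply PySem.List.foldl_congr_mem
  intro st y hy
  have hlt : y < rest.length := List.mem_range.mp hy
  have hcond : ((y : Int) ≠ ((rest.length + 1 : Nat) : Int) - 1) := by push_cast; omega
  have hdate : PySem.List.pyGetD (d0 :: rest) ((y : Int) + 1) 0 = rest.getD y 0 := by
    have h1 : ((y : Int) + 1) = (((y + 1 : Nat) : Int)) := by push_cast; ring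
    rw [h1, PySem.List.pyGetD_natCast]
    simp
  rw [hdate, if_pos hcond]

-- The cons-case goal of the verdict, assembled from pv_range_loop and pv_loop.
theorem pv_main (data : List (List Int)) (d0 : Int) (rest : List Int) :
    ((List.range rest.length).foldl
      (fun (x : List (List Int) × List (List (List Int))) (y : Nat) =>
        if (y : Int) ≠ ((rest.length + 1 : Nat) : Int) - 1 then
          (if (pvBucket x.1 (PySem.List.pyGetD (d0 :: rest) ((y : Int) + 1) 0)).length ≠ 0 then
             x.1.drop (pvBucket x.1 (PySem.List.pyGetD (d0 :: rest) ((y : Int) + 1) 0)).length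
           else x.1,
           x.2 ++ [pvBucket x.1 (PySem.List.pyGetD (d0 :: rest) ((y : Int) + 1) 0)])
        else x) (data, [])).2
    = (rest.foldl
        (fun (st : Nat × List (List (List Int))) date =>
          (st.1 + (pvBucket (data.drop st.1) date).length,
           st.2 ++ [pvBucket (data.drop st.1) date])) (0, [])).2 := by
  rw [pv_range_loop]
  have := pv_loop data rest 0 []
  simpa using this

-- Once every record is consumed (p = data.length) every later bucket is empty.
theorem pv_pad (data : List (List Int)) (ds : List Int) (acc : List (List (List Int))) :
    (ds.foldl
      (fun (st : Nat × List (List (List Int))) date =>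
        (st.1 + (pvBucket (data.drop st.1) date).length,
         st.2 ++ [pvBucket (data.drop st.1) date])) (data.length, acc)).2
    = acc ++ List.replicate ds.length [] := by
  induction ds generalizing acc with
  | nil => simp
  | cons d ds ih =>
    simp only [List.foldl_cons, List.drop_length]
    have hb : pvBucket [] d = [] := rfl
    simp only [hb, List.length_nil, Nat.add_zero]
    rw [ih]
    simp [List.replicate_succ]

-- The plain fold over the tail equals B's early-exiting recursion with padding.
theorem pv_fold_to_alt (data : List (List Int)) (ds : List Int) :
    ∀ (p : Nat) (acc : List (List (List Int))), p ≤ data.length →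
    (ds.foldl
      (fun (st : Nat × List (List (List Int))) date =>
        (st.1 + (pvBucket (data.drop st.1) date).length,
         st.2 ++ [pvBucket (data.drop st.1) date])) (p, acc)).2
    = acc ++ processAltLoop data data.length ds p := by
  induction ds with
  | nil => intro p acc _; simp [processAltLoop]
  | cons d ds ih =>
    intro p acc hp
    by_cases h : p < data.length
    · have hk : (pvBucket (data.drop p) d).length ≤ data.length - p := by
        have h1 : (pvBucket (data.drop p) d).length ≤ (data.drop p).length :=
          List.length_filterMap_le _ _
        simpa [List.length_drop] using h1
      simp only [List.foldl_cons]
      rw [ih (p + (pvBucket (data.drop p) d).length) (acc ++ [pvBucket (data.drop p) d])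
        (by omega)]
      simp [processAltLoop, h, pvBucket_fold]
    · have hpe : p = data.length := by omega
      subst hpe
      rw [pv_pad data (d :: ds) acc]
      simp [processAltLoop]

-- ===== VERDICT (by name: the statement is the Claim_ definition above) =====
theorem process_py_spec : Claim_equal_process_py := by
  intro data dates_list _hdom _hpre
  unfold Spec_process_py process_py process_py_alt
  simp only [PySem.List.slice_from_one, PySem.List.pyRange_zero_natCast, List.foldl_map,
    List.map_id', PySem.List.slice_zero_start, pv_bucket_eq, List.nil_append,
    pvBucket_fold, pv_dropN]
  cases dates_list with
  | nil => simp [processAltLoop]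
  | cons d0 rest =>
    simp only [List.length_cons, List.tail_cons, List.range_succ, List.foldl_append,
      List.foldl_cons, List.foldl_nil]
    have hlast : ¬ ((rest.length : Int) ≠ ((rest.length + 1 : Nat) : Int) - 1) := by
      push_cast; omega
    simp only [hlast, if_false]
    refine (pv_main data d0 rest).trans ?_
    simpa using pv_fold_to_alt data rest 0 [] (Nat.zero_le _)
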